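-- pv_equiv track=rewrite | github.com/robinklaassen/aoc2023 | day03/part1.py | get_number_positions
-- ===== SOURCE A (Python) =====
-- def get_number_positions(schematic: list[str]) -> list[tuple[int, int, int]]:
--     # position tuples are (line index, min char index, max char index)
--     positions = []
--     for line_idx, line in enumerate(schematic):
--         for char_idx, char in enumerate(line):
--             if not char.isnumeric():
--                 continue
--
--             number_idxs = find_number_idxs(line, char_idx)
--             # number = int(line[number_idxs[0]:number_idxs[1]+1])
--             position = line_idx, *number_idxs
--             if position not in positions:
--                 positions.append(position)
--
--     return positions
--
-- def find_number_idxs(line: str, char_idx: int) -> tuple[int, int]: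
--     min_idx = char_idx
--     while min_idx != 0 and line[min_idx - 1].isnumeric():
--         min_idx -= 1
--
--     max_idx = char_idx
--     while max_idx != len(line) - 1 and line[max_idx + 1].isnumeric():
--         max_idx += 1
--
--     return min_idx, max_idx
-- ===== SOURCE B (Python) =====
-- def get_number_positions(schematic: list[str]) -> list[tuple[int, int, int]]:
--     # Single left-to-right scan per line: detect each maximal numeric run once,
--     # emitting (line index, run start, run end) in order. No rescans, no membership checks.
--     positions = []
--     for line_idx, line in enumerate(schematic):
--         start = None
--         for i, ch in enumerate(line):
--             if ch.isnumeric():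
--                 if start is None:
--                     start = i
--             elif start is not None:
--                 positions.append((line_idx, start, i - 1))
--                 start = None
--         if start is not None:
--             positions.append((line_idx, start, len(line) - 1))
--     return positions
-- ===== Notes on version B (the rewrite author's own statement) =====
-- stated objective: alternative
-- what changed: Replaces A's per-digit left/right rescans plus a linear membership check against the growing result list with a single left-to-right scan per line that detects each maximal digit run once and emits it immediately.
import Mathlib
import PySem

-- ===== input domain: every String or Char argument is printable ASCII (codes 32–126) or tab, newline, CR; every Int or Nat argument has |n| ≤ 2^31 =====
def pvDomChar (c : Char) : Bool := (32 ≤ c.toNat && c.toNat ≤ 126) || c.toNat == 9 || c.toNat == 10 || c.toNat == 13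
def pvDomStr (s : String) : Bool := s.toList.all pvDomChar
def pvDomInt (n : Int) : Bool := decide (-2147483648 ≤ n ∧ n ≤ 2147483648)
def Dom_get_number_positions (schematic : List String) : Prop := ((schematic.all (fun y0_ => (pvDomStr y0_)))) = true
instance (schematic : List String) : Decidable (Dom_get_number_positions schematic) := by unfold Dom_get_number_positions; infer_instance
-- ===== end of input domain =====

-- B replaces A's per-digit rescans and membership checks with one left-to-right run scan per line.

-- ===== PORT A =====
-- char.isnumeric(): on the printable-ASCII domain Dom this is exactly '0'..'9'
def pvIsNum (c : Char) : Bool := PySem.Chars.isdigit c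

-- 'while min_idx != 0 and line[min_idx-1].isnumeric(): min_idx -= 1'  (structural on the index)
def pvFindMin (cs : List Char) : Nat → Nat
  | 0 => 0
  | i+1 => if pvIsNum (cs.getD i ' ') then pvFindMin cs i else i+1

-- 'while max_idx != len(line)-1 and line[max_idx+1].isnumeric(): max_idx += 1'  (fuel = len(line) bounds the walk)
def pvFindMax (cs : List Char) : Nat → Nat → Nat
  | 0, i => i
  | f+1, i => if i ≠ cs.length - 1 ∧ pvIsNum (cs.getD (i+1) ' ') = true then pvFindMax cs (f) (i+1) else i

-- inner 'for char_idx, char in enumerate(line)' loop of A (cs = full line, u = remaining suffix)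
def pvInnerA (li : Int) (cs : List Char) : Nat → List Char → List (Int × Int × Int) → List (Int × Int × Int)
  | _, [], acc => acc
  | i, c :: rest, acc =>
    if pvIsNum c = false then pvInnerA li cs (i+1) rest acc
    else
      if (li, (pvFindMin cs i : Int), (pvFindMax cs cs.length i : Int)) ∈ acc then
        pvInnerA li cs (i+1) rest acc
      else
        pvInnerA li cs (i+1) rest (acc ++ [(li, (pvFindMin cs i : Int), (pvFindMax cs cs.length i : Int))])

-- outer 'for line_idx, line in enumerate(schematic)' loop of A
def pvOuterA : Nat → List String → List (Int × Int × Int) → List (Int × Int × Int)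
  | _, [], acc => acc
  | k, s :: rest, acc => pvOuterA (k+1) rest (pvInnerA (k : Int) s.toList 0 s.toList acc)

def get_number_positions (schematic : List String) : List (Int × Int × Int) :=
  pvOuterA 0 schematic []

-- ===== PORT B =====

-- B's inner loop: single scan with 'start' state; at loop exit i = len(line), so i-1 = len(line)-1 (the final flush)
def pvScanB (li : Int) : List Char → Nat → Option Nat → List (Int × Int × Int) → List (Int × Int × Int)
  | [], i, st, acc =>
    match st with
    | none => acc
    | some s => acc ++ [(li, (s : Int), (i : Int) - 1)]
  | c :: rest, i, st, acc =>
    if pvIsNum c then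
      pvScanB li rest (i+1) (match st with | none => some i | some s => some s) acc
    else
      match st with
      | some s => pvScanB li rest (i+1) none (acc ++ [(li, (s : Int), (i : Int) - 1)])
      | none => pvScanB li rest (i+1) none acc

def pvOuterB : Nat → List String → List (Int × Int × Int) → List (Int × Int × Int)
  | _, [], acc => acc
  | k, s :: rest, acc => pvOuterB (k+1) rest (pvScanB (k : Int) s.toList 0 none acc)

def get_number_positions_alt (schematic : List String) : List (Int × Int × Int) :=
  pvOuterB 0 schematic []

-- ===== PRECONDITION & SPEC =====
def Spec_get_number_positions (schematic : List String) (out : List (Int × Int × Int)) : Prop := out = get_number_positions_alt schematic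
instance (schematic : List String) (out : List (Int × Int × Int)) : Decidable (Spec_get_number_positions schematic out) := by unfold Spec_get_number_positions; infer_instance

-- ===== CLAIM (what is proved, stated in full; the proofs are below) =====
def Claim_equal_get_number_positions : Prop := ∀ (schematic : List String), Dom_get_number_positions schematic → Spec_get_number_positions schematic (get_number_positions schematic)

-- ===== LEMMAS AND PROOFS =====

-- pure (accumulator-free) form of B's inner scan, used only by the proofs
def pvScanP (li : Int) : List Char → Nat → Option Nat → List (Int × Int × Int)
  | [], i, st =>
    match st with
    | none => []
    | some s => [(li, (s : Int), (i : Int) - 1)]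
  | c :: rest, i, st =>
    if pvIsNum c then
      pvScanP li rest (i+1) (match st with | none => some i | some s => some s)
    else
      match st with
      | some s => (li, (s : Int), (i : Int) - 1) :: pvScanP li rest (i+1) none
      | none => pvScanP li rest (i+1) none

-- length of the digit run starting at index i
def pvTw (cs : List Char) (i : Nat) : Nat := ((cs.drop i).takeWhile pvIsNum).length
lemma pvScanB_eq (li : Int) : ∀ (u : List Char) (i : Nat) (st : Option Nat) (acc : List (Int × Int × Int)),
    pvScanB li u i st acc = acc ++ pvScanP li u i st := by
  intro u
  induction u with
  | nil => intro i st acc; cases st <;> simp [pvScanB, pvScanP]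
  | cons c rest ih =>
    intro i st acc
    by_cases hc : pvIsNum c = true
    · cases st <;> simp [pvScanB, pvScanP, hc, ih]
    · simp only [Bool.not_eq_true] at hc
      cases st <;> simp [pvScanB, pvScanP, hc, ih]

lemma pvScanP_fst (li : Int) : ∀ (u : List Char) (i : Nat) (st : Option Nat) (x : Int × Int × Int),
    x ∈ pvScanP li u i st → x.1 = li := by
  intro u
  induction u with
  | nil =>
    intro i st x hx
    cases st <;> simp [pvScanP] at hx
    · simp [hx]
  | cons c rest ih =>
    intro i st x hx
    by_cases hc : pvIsNum c = true
    · cases st <;> simp only [pvScanP, hc, if_pos] at hx <;> exact ih _ _ _ hx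
    · simp only [Bool.not_eq_true] at hc
      cases st with
      | none => simp only [pvScanP, hc] at hx; exact ih _ _ _ hx
      | some s =>
        simp only [pvScanP, hc, Bool.false_eq_true, if_false, List.mem_cons] at hx
        rcases hx with h | h
        · simp [h]
        · exact ih _ _ _ h

lemma pvTw_nil {cs : List Char} {i : Nat} (h : cs.drop i = []) : pvTw cs i = 0 := by
  simp [pvTw, h]

lemma pvTw_cons_true {cs : List Char} {i : Nat} {c : Char} {rest : List Char}
    (h : cs.drop i = c :: rest) (hc : pvIsNum c = true) : pvTw cs i = pvTw cs (i+1) + 1 := by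
  have hd : cs.drop (i+1) = rest := by
    have h1 : (cs.drop i).drop 1 = rest := by rw [h]; rfl
    rw [List.drop_drop] at h1
    exact h1
  simp [pvTw, h, hd, hc]

lemma pvTw_cons_false {cs : List Char} {i : Nat} {c : Char} {rest : List Char}
    (h : cs.drop i = c :: rest) (hc : pvIsNum c = false) : pvTw cs i = 0 := by
  simp [pvTw, h, hc]

lemma pvDrop_facts {cs : List Char} {i : Nat} {c : Char} {rest : List Char}
    (h : cs.drop i = c :: rest) :
    i < cs.length ∧ cs.getD i ' ' = c ∧ cs.drop (i+1) = rest := by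
  have hi : i < cs.length := by
    by_contra hle
    rw [List.drop_eq_nil_of_le (by omega)] at h
    simp at h
  have hget : cs.getD i ' ' = c := by
    have h0 : (cs.drop i)[0]? = some c := by rw [h]; rfl
    rw [List.getElem?_drop, Nat.add_zero] at h0
    simp [List.getD, h0]
  have hd : cs.drop (i+1) = rest := by
    have h1 : (cs.drop i).drop 1 = rest := by rw [h]; rfl
    rw [List.drop_drop] at h1
    exact h1
  exact ⟨hi, hget, hd⟩

lemma pvFindMin_eq (cs : List Char) :
    ∀ (d s : Nat), (s = 0 ∨ pvIsNum (cs.getD (s-1) ' ') = false) →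
      (∀ k, s ≤ k → k ≤ s + d → pvIsNum (cs.getD k ' ') = true) →
      pvFindMin cs (s + d) = s := by
  intro d
  induction d with
  | zero =>
    intro s hb _
    cases s with
    | zero => simp [pvFindMin]
    | succ s' =>
      rcases hb with h | h
      · exact absurd h (Nat.succ_ne_zero s')
      · simp only [Nat.add_zero]
        simp only [Nat.succ_sub_one] at h
        simp only [pvFindMin]
        rw [if_neg (by simp only [List.getD] at h; simp [h])]
  | succ d ih =>
    intro s hb hdig
    have h1 : pvIsNum (cs.getD (s + d) ' ') = true :=
      hdig (s + d) (Nat.le_add_right s d) (by omega)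
    have : s + (d + 1) = (s + d) + 1 := by omega
    rw [this]
    simp only [pvFindMin]
    rw [if_pos h1]
    exact ih s hb (fun k hk1 hk2 => hdig k hk1 (by omega))

lemma pvFindMax_eq (cs : List Char) :
    ∀ (f i : Nat), i < cs.length → pvTw cs (i+1) ≤ f → pvFindMax cs f i = i + pvTw cs (i+1) := by
  intro f
  induction f with
  | zero =>
    intro i _ htw
    have : pvTw cs (i+1) = 0 := Nat.le_zero.mp htw
    simp [pvFindMax, this]
  | succ f ih =>
    intro i hi htw
    by_cases hlast : i = cs.length - 1
    · have hnil : cs.drop (i+1) = [] := by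
        apply List.drop_eq_nil_of_le
        omega
      have h0 : pvTw cs (i+1) = 0 := pvTw_nil hnil
      subst hlast
      simp [pvFindMax, h0]
    · have hi1 : i + 1 < cs.length := by omega
      have hdr : cs.drop (i+1) = cs[i+1] :: cs.drop (i+2) := by
        exact (List.getElem_cons_drop hi1).symm
      have hget : cs.getD (i+1) ' ' = cs[i+1] := by
        simp [List.getD, List.getElem?_eq_getElem hi1]
      by_cases hc : pvIsNum cs[i+1] = true
      · have htw1 : pvTw cs (i+1) = pvTw cs (i+1+1) + 1 := pvTw_cons_true hdr hc
        have hrec : pvFindMax cs f (i+1) = (i+1) + pvTw cs (i+1+1) :=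
          ih (i+1) hi1 (by omega)
        simp only [pvFindMax]
        rw [if_pos ⟨hlast, by rw [hget]; exact hc⟩, hrec]
        omega
      · simp only [Bool.not_eq_true] at hc
        have h0 : pvTw cs (i+1) = 0 := pvTw_cons_false hdr hc
        simp only [pvFindMax]
        rw [if_neg (by rintro ⟨-, hb⟩; rw [hget] at hb; simp [hc] at hb), h0, Nat.add_zero]

lemma pvInner_main (cs : List Char) (li : Int) :
    ∀ (u : List Char) (i : Nat) (st : Option Nat) (acc acc' : List (Int × Int × Int)),
      u = cs.drop i →
      (st = none → acc' = acc ∧ (i = 0 ∨ pvIsNum (cs.getD (i-1) ' ') = false) ∧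
        ∀ x ∈ acc, x.1 ≠ li ∨ x.2.1 < (i : Int)) →
      (∀ s, st = some s → acc = acc' ++ [(li, (s : Int), (i : Int) - 1 + (pvTw cs i : Int))] ∧ s < i ∧
        (∀ k, s ≤ k → k < i → pvIsNum (cs.getD k ' ') = true) ∧
        (s = 0 ∨ pvIsNum (cs.getD (s-1) ' ') = false) ∧
        ∀ x ∈ acc', x.1 ≠ li ∨ x.2.1 < (s : Int)) →
      pvInnerA li cs i u acc = acc' ++ pvScanP li u i st := by
  intro u
  induction u with
  | nil =>
    intro i st acc acc' hu hnone hsome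
    cases st with
    | none =>
      obtain ⟨hacc, _, _⟩ := hnone rfl
      simp [pvInnerA, pvScanP, hacc]
    | some s =>
      obtain ⟨hacc, _, _, _, _⟩ := hsome s rfl
      have h0 : pvTw cs i = 0 := pvTw_nil hu.symm
      rw [h0] at hacc
      simp only [Nat.cast_zero, add_zero] at hacc
      simp [pvInnerA, pvScanP, hacc]
  | cons c rest ih =>
    intro i st acc acc' hu hnone hsome
    obtain ⟨hi, hget, hdrop⟩ := pvDrop_facts hu.symm
    by_cases hc : pvIsNum c = true
    · -- digit character
      have hmx : pvFindMax cs cs.length i = i + pvTw cs (i+1) := by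
        apply pvFindMax_eq cs cs.length i hi
        calc pvTw cs (i+1) ≤ (cs.drop (i+1)).length := by
              simpa [pvTw] using List.IsPrefix.length_le (List.takeWhile_prefix (l := cs.drop (i+1)) pvIsNum)
          _ ≤ cs.length := by rw [List.length_drop]; omega
      have htwi : pvTw cs i = pvTw cs (i+1) + 1 := pvTw_cons_true hu.symm hc
      cases st with
      | none =>
        obtain ⟨hacc', hb, hprop⟩ := hnone rfl
        have hmn : pvFindMin cs i = i := by
          have := pvFindMin_eq cs 0 i hb
            (fun k hk1 hk2 => by
              have : k = i := by omega
              subst this; rw [hget]; exact hc)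
          simpa using this
        have hnotmem : (li, (i : Int), ((i + pvTw cs (i+1) : Nat) : Int)) ∉ acc := by
          intro hmem
          rcases hprop _ hmem with h | h
          · exact h rfl
          · simp at h
        -- unfold one step of pvInnerA
        have step : pvInnerA li cs i (c :: rest) acc
            = pvInnerA li cs (i+1) rest (acc ++ [(li, (i : Int), ((i + pvTw cs (i+1) : Nat) : Int))]) := by
          have hc' : ¬ (pvIsNum c = false) := by simp [hc]
          simp only [pvInnerA]
          rw [if_neg hc', hmn, hmx, if_neg hnotmem]
        rw [step]
        have hrec := ih (i+1) (some i)
          (acc ++ [(li, (i : Int), ((i + pvTw cs (i+1) : Nat) : Int))]) acc hdrop.symm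
          (by intro h; simp at h)
          (by
            intro s hs
            injection hs with hs; subst hs
            refine ⟨?_, by omega, ?_, hb, ?_⟩
            · have h3 : ((i + pvTw cs (i+1) : Nat) : Int) = ((i+1 : Nat) : Int) - 1 + ((pvTw cs (i+1) : Nat) : Int) := by
                push_cast; omega
              rw [h3]
            · intro k hk1 hk2
              have : k = i := by omega
              subst this; rw [hget]; exact hc
            · intro x hx
              rcases hprop x hx with h | h
              · exact Or.inl h
              · exact Or.inr h)
        rw [hacc']
        rw [show ((i + pvTw cs (i+1) : Nat) : Int) = ((i:Int) + (pvTw cs (i+1) : Int)) by push_cast; omega] at hrec ⊢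
        rw [hrec]
        simp [pvScanP, hc]
      | some s =>
        obtain ⟨hacc, hsi, hdig, hbs, hprop'⟩ := hsome s rfl
        have hmn : pvFindMin cs i = s := by
          have := pvFindMin_eq cs (i - s) s hbs
            (fun k hk1 hk2 => by
              by_cases hki : k = i
              · subst hki; rw [hget]; exact hc
              · exact hdig k hk1 (by omega))
          rwa [show s + (i - s) = i by omega] at this
        have hmem : (li, (s : Int), ((i + pvTw cs (i+1) : Nat) : Int)) ∈ acc := by
          rw [hacc]
          have : (li, (s : Int), (i : Int) - 1 + (pvTw cs i : Int))
              = (li, (s : Int), ((i + pvTw cs (i+1) : Nat) : Int)) := by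
            congr 2
            rw [htwi]; push_cast; omega
          rw [← this]
          simp
        have step : pvInnerA li cs i (c :: rest) acc = pvInnerA li cs (i+1) rest acc := by
          have hc' : ¬ (pvIsNum c = false) := by simp [hc]
          simp only [pvInnerA]
          rw [if_neg hc', hmn, hmx, if_pos hmem]
        rw [step]
        have hrec := ih (i+1) (some s) acc acc' hdrop.symm
          (by intro h; simp at h)
          (by
            intro s' hs'
            injection hs' with hs'; subst hs'
            refine ⟨?_, by omega, ?_, hbs, hprop'⟩
            · rw [hacc]
              congr 4
              rw [htwi]; push_cast; omega
            · intro k hk1 hk2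
              by_cases hki : k = i
              · subst hki; rw [hget]; exact hc
              · exact hdig k hk1 (by omega))
        rw [hrec]
        simp [pvScanP, hc]
    · -- non-digit character
      simp only [Bool.not_eq_true] at hc
      have step : pvInnerA li cs i (c :: rest) acc = pvInnerA li cs (i+1) rest acc := by
        simp [pvInnerA, hc]
      cases st with
      | none =>
        obtain ⟨hacc', hb, hprop⟩ := hnone rfl
        have hrec := ih (i+1) none acc acc hdrop.symm
          (by
            intro _
            refine ⟨rfl, Or.inr ?_, ?_⟩
            · rw [show i + 1 - 1 = i from rfl, hget]; exact hc
            · intro x hx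
              rcases hprop x hx with h | h
              · exact Or.inl h
              · right; push_cast; omega)
          (by intro s hs; simp at hs)
        rw [step, hrec, hacc']
        simp [pvScanP, hc]
      | some s =>
        obtain ⟨hacc, hsi, hdig, hbs, hprop'⟩ := hsome s rfl
        have htw0 : pvTw cs i = 0 := pvTw_cons_false hu.symm hc
        rw [htw0] at hacc
        simp only [Nat.cast_zero, add_zero] at hacc
        have hrec := ih (i+1) none acc acc hdrop.symm
          (by
            intro _
            refine ⟨rfl, Or.inr ?_, ?_⟩
            · rw [show i + 1 - 1 = i from rfl, hget]; exact hc
            · intro x hx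
              rw [hacc] at hx
              rcases List.mem_append.mp hx with h | h
              · rcases hprop' x h with h' | h'
                · exact Or.inl h'
                · right; push_cast; omega
              · simp only [List.mem_singleton] at h
                subst h
                right
                simp only
                push_cast; omega)
          (by intro s hs; simp at hs)
        rw [step, hrec, hacc]
        simp [pvScanP, hc]

lemma pvInner_eq (li : Int) (cs : List Char) (acc : List (Int × Int × Int))
    (h : ∀ x ∈ acc, x.1 ≠ li) :
    pvInnerA li cs 0 cs acc = acc ++ pvScanP li cs 0 none := by
  apply pvInner_main cs li cs 0 none acc acc (by simp)
  · intro _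
    exact ⟨rfl, Or.inl rfl, fun x hx => Or.inl (h x hx)⟩
  · intro s hs
    simp at hs

lemma pvOuter_eq : ∀ (lines : List String) (k : Nat) (acc : List (Int × Int × Int)),
    (∀ x ∈ acc, x.1 < (k : Int)) → pvOuterA k lines acc = pvOuterB k lines acc := by
  intro lines
  induction lines with
  | nil => intro k acc _; rfl
  | cons s rest ih =>
    intro k acc hacc
    have hne : ∀ x ∈ acc, x.1 ≠ (k : Int) := by
      intro x hx
      have := hacc x hx
      omega
    have hinner : pvInnerA (k : Int) s.toList 0 s.toList acc
        = acc ++ pvScanP (k : Int) s.toList 0 none := pvInner_eq _ _ _ hne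
    have hscan : pvScanB (k : Int) s.toList 0 none acc
        = acc ++ pvScanP (k : Int) s.toList 0 none := pvScanB_eq _ _ _ _ _
    simp only [pvOuterA, pvOuterB, hinner, hscan]
    apply ih
    intro x hx
    rcases List.mem_append.mp hx with h | h
    · have := hacc x h
      push_cast
      omega
    · have := pvScanP_fst _ _ _ _ _ h
      rw [this]
      push_cast
      omega

-- ===== VERDICT (by name: the statement is the Claim_ definition above) =====
theorem get_number_positions_spec : Claim_equal_get_number_positions := by
  intro schematic _
  unfold Spec_get_number_positions get_number_positions get_number_positions_alt
  exact pvOuter_eq schematic 0 [] (by simp)
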